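-- pv_equiv track=rewrite | github.com/BuDozKeN/AI-council | backend/routers/company/activity_impl.py | _collect_related_ids
-- ===== SOURCE A (Python) =====
-- from typing import Set, Dict, List, Optional, Tuple
--
-- def _collect_related_ids(logs: List[Dict]) -> Tuple[Set[str], Set[str], Set[str]]:
--     """
--     Collect all related IDs from logs grouped by type.
--
--     Args:
--         logs: List of activity log dictionaries
--
--     Returns:
--         Tuple of (decision_ids, playbook_ids, project_ids)
--     """
--     decision_ids = set()
--     playbook_ids = set()
--     project_ids = set()
--
--     for log in logs:
--         related_id = log.get("related_id")
--         related_type = log.get("related_type")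
--
--         if related_id and related_type:
--             if related_type == "decision":
--                 decision_ids.add(related_id)
--             elif related_type == "playbook":
--                 playbook_ids.add(related_id)
--             elif related_type == "project":
--                 project_ids.add(related_id)
--
--     return decision_ids, playbook_ids, project_ids
-- ===== SOURCE B (Python) =====
-- def _ids_of(logs, ty):
--     return {log["related_id"] for log in logs
--             if log.get("related_id") and log.get("related_type") == ty}
--
--
-- def _collect_related_ids(logs):
--     return (_ids_of(logs, "decision"),
--             _ids_of(logs, "playbook"),
--             _ids_of(logs, "project"))
-- ===== Notes on version B (the rewrite author's own statement) =====
-- stated objective: simpler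
-- what changed: Replaces the single branching loop over three mutable set accumulators with three independent per-type set comprehensions, each filtering logs directly.
import Mathlib
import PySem

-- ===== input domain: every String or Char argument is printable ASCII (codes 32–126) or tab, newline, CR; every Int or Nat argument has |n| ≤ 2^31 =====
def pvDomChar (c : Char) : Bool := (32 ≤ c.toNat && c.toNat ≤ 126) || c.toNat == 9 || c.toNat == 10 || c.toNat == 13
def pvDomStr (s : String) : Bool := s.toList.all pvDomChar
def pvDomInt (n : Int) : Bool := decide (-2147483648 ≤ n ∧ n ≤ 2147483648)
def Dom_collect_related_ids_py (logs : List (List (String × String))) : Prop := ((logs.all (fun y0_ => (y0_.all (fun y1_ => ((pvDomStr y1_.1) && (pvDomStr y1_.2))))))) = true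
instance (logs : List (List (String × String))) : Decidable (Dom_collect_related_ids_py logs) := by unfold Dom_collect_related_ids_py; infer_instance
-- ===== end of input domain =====

-- B replaces A's single branching loop with three independent per-type set comprehensions (simpler decomposition, same cost).


-- ===== PORT A =====
-- one fold over logs, dispatching each log into one of three set accumulators (A's loop)
def collectStepA (acc : PySem.Set String × PySem.Set String × PySem.Set String)
    (log : List (String × String)) : PySem.Set String × PySem.Set String × PySem.Set String :=
  let related_id := PySem.Dict.get? (PySem.Dict.mk log) "related_id"
  let related_type := PySem.Dict.get? (PySem.Dict.mk log) "related_type"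
  match related_id, related_type with
  | some rid, some rty =>
    if rid ≠ "" ∧ rty ≠ "" then
      if rty = "decision" then (PySem.Set.add acc.1 rid, acc.2.1, acc.2.2)
      else if rty = "playbook" then (acc.1, PySem.Set.add acc.2.1 rid, acc.2.2)
      else if rty = "project" then (acc.1, acc.2.1, PySem.Set.add acc.2.2 rid)
      else acc
    else acc
  | _, _ => acc

def collect_related_ids_py (logs : List (List (String × String))) : List String × List String × List String :=
  logs.foldl collectStepA (PySem.Set.empty, PySem.Set.empty, PySem.Set.empty)

-- ===== PORT B =====
-- B's helper: one set comprehension per type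
def idsOf (logs : List (List (String × String))) (ty : String) : PySem.Set String :=
  PySem.Set.ofList (logs.filterMap (fun log =>
    match PySem.Dict.get? (PySem.Dict.mk log) "related_id" with
    | some rid => if rid ≠ "" ∧ PySem.Dict.get? (PySem.Dict.mk log) "related_type" = some ty then some rid else none
    | none => none))

def collect_related_ids_py_alt (logs : List (List (String × String))) : List String × List String × List String :=
  (idsOf logs "decision", idsOf logs "playbook", idsOf logs "project")

-- ===== PRECONDITION & SPEC =====
def Spec_collect_related_ids_py (logs : List (List (String × String))) (out : List String × List String × List String) : Prop := out = collect_related_ids_py_alt logs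
instance (logs : List (List (String × String))) (out : List String × List String × List String) : Decidable (Spec_collect_related_ids_py logs out) := by unfold Spec_collect_related_ids_py; infer_instance

-- ===== CLAIM (what is proved, stated in full; the proofs are below) =====
def Claim_equal_collect_related_ids_py : Prop := ∀ (logs : List (List (String × String))), Dom_collect_related_ids_py logs → Spec_collect_related_ids_py logs (collect_related_ids_py logs)

-- ===== LEMMAS AND PROOFS =====
def selOf (ty : String) (log : List (String × String)) : Option String :=
  match PySem.Dict.get? (PySem.Dict.mk log) "related_id" with
  | some rid => if rid ≠ "" ∧ PySem.Dict.get? (PySem.Dict.mk log) "related_type" = some ty then some rid else none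
  | none => none

theorem idsOf_eq (logs : List (List (String × String))) (ty : String) :
    idsOf logs ty = PySem.Set.ofList (logs.filterMap (selOf ty)) := rfl

theorem foldl_collectStepA (logs : List (List (String × String)))
    (d p r : PySem.Set String) :
    logs.foldl collectStepA (d, p, r) =
      ((logs.filterMap (selOf "decision")).foldl PySem.Set.add d,
       (logs.filterMap (selOf "playbook")).foldl PySem.Set.add p,
       (logs.filterMap (selOf "project")).foldl PySem.Set.add r) := by
  induction logs generalizing d p r with
  | nil => rfl
  | cons log rest ih =>
    simp only [List.foldl_cons, List.filterMap_cons]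
    have hstep : ∀ (d p r : PySem.Set String),
        collectStepA (d, p, r) log =
          ((match selOf "decision" log with | some x => PySem.Set.add d x | none => d),
           (match selOf "playbook" log with | some x => PySem.Set.add p x | none => p),
           (match selOf "project" log with | some x => PySem.Set.add r x | none => r)) := by
      intro d p r
      simp only [collectStepA, selOf]
      cases hid : PySem.Dict.get? (PySem.Dict.mk log) "related_id" with
      | none => rfl
      | some rid =>
        cases hty : PySem.Dict.get? (PySem.Dict.mk log) "related_type" with
        | none => simp
        | some rty =>
          by_cases h1 : rid = "" <;> by_cases h2 : rty = "decision" <;>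
            by_cases h3 : rty = "playbook" <;> by_cases h4 : rty = "project" <;>
            subst_vars <;> simp_all
    rw [hstep]
    cases hd : selOf "decision" log <;> cases hp : selOf "playbook" log <;>
      cases hr : selOf "project" log <;> simp [ih]

theorem collect_related_ids_py_spec : Claim_equal_collect_related_ids_py := by
  intro logs _
  show collect_related_ids_py logs = collect_related_ids_py_alt logs
  rw [collect_related_ids_py, collect_related_ids_py_alt, foldl_collectStepA]
  simp [idsOf_eq, PySem.Set.ofList_eq_foldl, PySem.Set.empty]
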